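-- pv_equiv track=rewrite | github.com/PraneethMovva/Project2_Adventure | adventure.py | match_input_to_options
-- ===== SOURCE A (Python) =====
-- def match_input_to_options(user_input, valid_options):
--     matched_options = []
--     options_length = len(valid_options)
--
--     if valid_options is None or options_length == 0:
--         return matched_options
--
--     for option in valid_options:
--         if option == user_input:
--             return [option]
--         elif user_input in option:
--             matched_options.append(option)
--
--     return matched_options
-- ===== SOURCE B (Python) =====
-- def match_input_to_options(user_input, valid_options):
--     if user_input in valid_options:
--         return [user_input]
--     return [o for o in valid_options if user_input in o]
-- ===== Notes on version B (the rewrite author's own statement) =====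
-- stated objective: idiomatic
-- what changed: Replaces the single interleaved loop (append + early return) by two separate passes: a membership test that returns [user_input] on an exact match, then a list comprehension filtering by substring containment.
import Mathlib
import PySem

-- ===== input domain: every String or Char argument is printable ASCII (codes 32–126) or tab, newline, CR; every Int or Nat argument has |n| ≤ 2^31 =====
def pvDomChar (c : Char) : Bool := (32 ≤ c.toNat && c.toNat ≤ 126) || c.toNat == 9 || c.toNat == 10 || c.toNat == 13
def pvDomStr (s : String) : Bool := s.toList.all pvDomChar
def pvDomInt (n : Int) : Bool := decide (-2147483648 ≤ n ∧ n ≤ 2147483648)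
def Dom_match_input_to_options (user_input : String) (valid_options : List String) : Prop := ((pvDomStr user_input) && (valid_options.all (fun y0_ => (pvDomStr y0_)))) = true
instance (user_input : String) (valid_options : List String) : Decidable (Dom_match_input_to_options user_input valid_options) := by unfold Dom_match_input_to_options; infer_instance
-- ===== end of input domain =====

-- B splits A's single interleaved loop into two separate passes (membership test, then a substring filter); same cost, more idiomatic.


-- ===== PORT A =====
-- A's for-loop: early return [option] on exact match, else accumulate substring matches.
def matchLoopA (user_input : String) : List String → List String → List String
  | [], acc => acc
  | o :: rest, acc =>
    if o == user_input then [o]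
    else if PySem.Str.isIn user_input o then matchLoopA user_input rest (acc ++ [o])
    else matchLoopA user_input rest acc

def match_input_to_options (user_input : String) (valid_options : List String) : List String :=
  let options_length := valid_options.length
  if options_length = 0 then []
  else matchLoopA user_input valid_options []

-- ===== PORT B =====
def match_input_to_options_alt (user_input : String) (valid_options : List String) : List String :=
  if valid_options.contains user_input then [user_input]
  else valid_options.filter (fun o => PySem.Str.isIn user_input o)

-- ===== PRECONDITION & SPEC =====
def Spec_match_input_to_options (user_input : String) (valid_options : List String) (out : List String) : Prop := out = match_input_to_options_alt user_input valid_options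
instance (user_input : String) (valid_options : List String) (out : List String) : Decidable (Spec_match_input_to_options user_input valid_options out) := by unfold Spec_match_input_to_options; infer_instance

-- ===== CLAIM (what is proved, stated in full; the proofs are below) =====
def Claim_equal_match_input_to_options : Prop := ∀ (user_input : String) (valid_options : List String), Dom_match_input_to_options user_input valid_options → Spec_match_input_to_options user_input valid_options (match_input_to_options user_input valid_options)

-- ===== LEMMAS AND PROOFS =====
theorem matchLoopA_eq (u : String) (vs : List String) :
    ∀ acc, matchLoopA u vs acc =
      if vs.contains u then [u]
      else acc ++ vs.filter (fun o => PySem.Str.isIn u o) := by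
  induction vs with
  | nil => intro acc; simp [matchLoopA]
  | cons o rest ih =>
    intro acc
    by_cases ho : o = u
    · subst ho; simp [matchLoopA]
    · have hbeq : (o == u) = false := by simp [ho]
      by_cases hin : PySem.Chars.isIn u.toList o.toList
      all_goals
        simp [matchLoopA, PySem.Str.isIn, hbeq, hin, ih, Ne.symm ho]

-- ===== VERDICT (by name: the statement is the Claim_ definition above) =====
theorem match_input_to_options_spec : Claim_equal_match_input_to_options := by
  intro u vs _
  unfold Spec_match_input_to_options match_input_to_options match_input_to_options_alt
  cases vs with
  | nil => simp
  | cons o rest => simp only [List.length_cons]; rw [if_neg (by omega), matchLoopA_eq]; simp
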